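-- pv_equiv track=rewrite | github.com/Sonik-alkogolik/showcase-designer-dev | tools/e2e_seed_demo_shops.py | products_for_niche
-- ===== SOURCE A (Python) =====
-- def products_for_niche(niche: str, count: int) -> list[dict[str, str]]:
--     catalog: dict[str, list[tuple[str, int, str, str]]] = {
--         "manicure": [
--             ("Маникюр классический", 1200, "Аккуратная обработка и покрытие", "nails,manicure"),
--             ("Маникюр + гель-лак", 1800, "Стойкое покрытие до 3 недель", "gel,nails"),
--             ("Укрепление ногтей", 1600, "Укрепление базой и выравнивание", "nail,beauty"),
--             ("Дизайн 2 ногтей", 700, "Минималистичный дизайн", "nail,design"),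
--         ],
--         "barber": [
--             ("Мужская стрижка", 1200, "Стрижка машинкой и ножницами", "barber,haircut"),
--             ("Стрижка + борода", 1800, "Комплексная услуга", "beard,barber"),
--             ("Оформление бороды", 900, "Контур и форма", "beard,style"),
--             ("Камуфляж седины", 1500, "Тонирование под натуральный цвет", "hair,men"),
--         ],
--         "autoservice": [
--             ("Замена масла", 2200, "Работа + расходники по согласованию", "car,service"),
--             ("Диагностика ходовой", 1800, "Проверка подвески и рекомендация", "auto,mechanic"),
--             ("Замена тормозных колодок", 3200, "Передняя ось", "brake,car"),
--             ("Компьютерная диагностика", 1500, "Считывание ошибок ЭБУ", "auto,diagnostic"),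
--         ],
--         "evacuator": [
--             ("Эвакуация по городу", 3500, "Подача до 30 минут", "tow,truck"),
--             ("Эвакуация за город", 5500, "До 30 км от города", "evacuator,car"),
--             ("Перевозка авто после ДТП", 4800, "Бережная погрузка", "accident,car"),
--             ("Прикурить авто", 1200, "Выезд и запуск АКБ", "battery,car"),
--         ],
--         "food": [
--             ("Бизнес-ланч", 450, "Суп, второе и салат", "food,lunch"),
--             ("Пицца Пепперони 30см", 790, "Классическая пицца", "pizza,food"),
--             ("Сет роллов", 1290, "24 кусочка", "sushi,roll"),
--             ("Бургер фирменный", 520, "Сочная котлета и соус", "burger,food"),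
--         ],
--     }
--     base = catalog[niche]
--     result: list[dict[str, str]] = []
--     for i in range(count):
--         name, price, desc, query = base[i % len(base)]
--         result.append(
--             {
--                 "name": f"{name} #{i+1}",
--                 "price": str(price + (i // len(base)) * 50),
--                 "description": desc,
--                 "image": f"https://source.unsplash.com/1200x800/?{query}&sig={i+1}",
--             }
--         )
--     return result
-- ===== SOURCE B (Python) =====
-- def products_for_niche(niche: str, count: int) -> list[dict[str, str]]:
--     catalog: dict[str, list[tuple[str, int, str, str]]] = {
--         "manicure": [
--             ("Маникюр классический", 1200, "Аккуратная обработка и покрытие", "nails,manicure"),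
--             ("Маникюр + гель-лак", 1800, "Стойкое покрытие до 3 недель", "gel,nails"),
--             ("Укрепление ногтей", 1600, "Укрепление базой и выравнивание", "nail,beauty"),
--             ("Дизайн 2 ногтей", 700, "Минималистичный дизайн", "nail,design"),
--         ],
--         "barber": [
--             ("Мужская стрижка", 1200, "Стрижка машинкой и ножницами", "barber,haircut"),
--             ("Стрижка + борода", 1800, "Комплексная услуга", "beard,barber"),
--             ("Оформление бороды", 900, "Контур и форма", "beard,style"),
--             ("Камуфляж седины", 1500, "Тонирование под натуральный цвет", "hair,men"),
--         ],
--         "autoservice": [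
--             ("Замена масла", 2200, "Работа + расходники по согласованию", "car,service"),
--             ("Диагностика ходовой", 1800, "Проверка подвески и рекомендация", "auto,mechanic"),
--             ("Замена тормозных колодок", 3200, "Передняя ось", "brake,car"),
--             ("Компьютерная диагностика", 1500, "Считывание ошибок ЭБУ", "auto,diagnostic"),
--         ],
--         "evacuator": [
--             ("Эвакуация по городу", 3500, "Подача до 30 минут", "tow,truck"),
--             ("Эвакуация за город", 5500, "До 30 км от города", "evacuator,car"),
--             ("Перевозка авто после ДТП", 4800, "Бережная погрузка", "accident,car"),
--             ("Прикурить авто", 1200, "Выезд и запуск АКБ", "battery,car"),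
--         ],
--         "food": [
--             ("Бизнес-ланч", 450, "Суп, второе и салат", "food,lunch"),
--             ("Пицца Пепперони 30см", 790, "Классическая пицца", "pizza,food"),
--             ("Сет роллов", 1290, "24 кусочка", "sushi,roll"),
--             ("Бургер фирменный", 520, "Сочная котлета и соус", "burger,food"),
--         ],
--     }
--     base = catalog[niche]
--     result: list[dict[str, str]] = []
--     i = 0
--     r = 0
--     # traverse by (round, position): each round walks the base once, price grows by 50*r
--     while i < count:
--         for name, price, desc, query in base:
--             if i >= count:
--                 break
--             result.append(
--                 {
--                     "name": f"{name} #{i+1}",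
--                     "price": str(price + r * 50),
--                     "description": desc,
--                     "image": f"https://source.unsplash.com/1200x800/?{query}&sig={i+1}",
--                 }
--             )
--             i += 1
--         r += 1
--     return result
-- ===== Notes on version B (the rewrite author's own statement) =====
-- stated objective: alternative
-- what changed: Replaces the single flat loop that derives round and position from i via modulo/floor-division with a nested round-by-round walk of the catalog entries that keeps a running global counter and round number, breaking out when the counter reaches count.
import Mathlib
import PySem

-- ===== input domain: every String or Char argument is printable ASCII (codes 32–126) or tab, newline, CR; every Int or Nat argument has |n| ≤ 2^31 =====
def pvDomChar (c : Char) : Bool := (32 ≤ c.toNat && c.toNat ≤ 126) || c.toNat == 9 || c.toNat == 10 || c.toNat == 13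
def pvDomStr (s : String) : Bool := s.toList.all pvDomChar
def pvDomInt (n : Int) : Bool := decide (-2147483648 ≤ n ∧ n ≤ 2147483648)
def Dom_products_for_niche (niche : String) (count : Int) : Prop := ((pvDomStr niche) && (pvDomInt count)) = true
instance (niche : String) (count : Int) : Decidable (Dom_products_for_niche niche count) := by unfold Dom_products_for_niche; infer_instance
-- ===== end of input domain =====

-- B changes the decomposition only: a nested (round, position) traversal with a running
-- counter replaces A's flat modulo/floor-division loop; same cost, no speed claim.

-- ===== PORT A =====
-- the literal catalog dict (shared data literal of both Pythons)
def pvCatalog : PySem.Dict String (List (String × Int × String × String)) :=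
  PySem.Dict.ofList [
    ("manicure", [
      ("Маникюр классический", 1200, "Аккуратная обработка и покрытие", "nails,manicure"),
      ("Маникюр + гель-лак", 1800, "Стойкое покрытие до 3 недель", "gel,nails"),
      ("Укрепление ногтей", 1600, "Укрепление базой и выравнивание", "nail,beauty"),
      ("Дизайн 2 ногтей", 700, "Минималистичный дизайн", "nail,design")]),
    ("barber", [
      ("Мужская стрижка", 1200, "Стрижка машинкой и ножницами", "barber,haircut"),
      ("Стрижка + борода", 1800, "Комплексная услуга", "beard,barber"),
      ("Оформление бороды", 900, "Контур и форма", "beard,style"),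
      ("Камуфляж седины", 1500, "Тонирование под натуральный цвет", "hair,men")]),
    ("autoservice", [
      ("Замена масла", 2200, "Работа + расходники по согласованию", "car,service"),
      ("Диагностика ходовой", 1800, "Проверка подвески и рекомендация", "auto,mechanic"),
      ("Замена тормозных колодок", 3200, "Передняя ось", "brake,car"),
      ("Компьютерная диагностика", 1500, "Считывание ошибок ЭБУ", "auto,diagnostic")]),
    ("evacuator", [
      ("Эвакуация по городу", 3500, "Подача до 30 минут", "tow,truck"),
      ("Эвакуация за город", 5500, "До 30 км от города", "evacuator,car"),
      ("Перевозка авто после ДТП", 4800, "Бережная погрузка", "accident,car"),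
      ("Прикурить авто", 1200, "Выезд и запуск АКБ", "battery,car")]),
    ("food", [
      ("Бизнес-ланч", 450, "Суп, второе и салат", "food,lunch"),
      ("Пицца Пепперони 30см", 790, "Классическая пицца", "pizza,food"),
      ("Сет роллов", 1290, "24 кусочка", "sushi,roll"),
      ("Бургер фирменный", 520, "Сочная котлета и соус", "burger,food")])]

-- A: flat loop over range(count); round/position via i // len(base), i % len(base)
def products_for_niche (niche : String) (count : Int) : List (List (String × String)) :=
  match pvCatalog.get? niche with
  | none => []   -- Python raises KeyError here; excluded by Pre_
  | some base =>
    (PySem.List.pyRange 0 count 1).foldl (fun result i =>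
      match PySem.List.pyGet? base (PySem.Int.mod i (base.length : Int)) with
      | none => result   -- unreachable: base is nonempty, index in range
      | some (name, price, desc, query) =>
        result ++ [[("name", name ++ " #" ++ PySem.Int.toStr (i + 1)),
                    ("price", PySem.Int.toStr (price + PySem.Int.floordiv i (base.length : Int) * 50)),
                    ("description", desc),
                    ("image", "https://source.unsplash.com/1200x800/?" ++ query ++ "&sig=" ++ PySem.Int.toStr (i + 1))]])
      []

-- ===== PORT B =====
-- inner 'for' loop of Source B: walk the base once, append and bump the counter, break at count
def pvAltInner (count r : Int) :
    List (String × Int × String × String) → Int → List (List (String × String)) →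
    Int × List (List (String × String))
  | [], i, acc => (i, acc)
  | (name, price, desc, query) :: rest, i, acc =>
    if count ≤ i then (i, acc)
    else pvAltInner count r rest (i + 1)
      (acc ++ [[("name", name ++ " #" ++ PySem.Int.toStr (i + 1)),
                ("price", PySem.Int.toStr (price + r * 50)),
                ("description", desc),
                ("image", "https://source.unsplash.com/1200x800/?" ++ query ++ "&sig=" ++ PySem.Int.toStr (i + 1))]])

-- outer 'while i < count' loop of Source B; fuel only makes the loop total (count.toNat rounds
-- always suffice for a nonempty base)
def pvAltOuter (base : List (String × Int × String × String)) (count : Int) :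
    Nat → Int → Int → List (List (String × String)) → List (List (String × String))
  | 0, _, _, acc => acc
  | fuel + 1, i, r, acc =>
    if i < count then
      match pvAltInner count r base i acc with
      | (i', acc') => pvAltOuter base count fuel i' (r + 1) acc'
    else acc

def products_for_niche_alt (niche : String) (count : Int) : List (List (String × String)) :=
  match pvCatalog.get? niche with
  | none => []   -- Python raises KeyError here; excluded by Pre_
  | some base => pvAltOuter base count count.toNat 0 0 []

-- ===== PRECONDITION & SPEC =====
-- Pre_ excludes exactly the niches absent from the catalog, on which A raises KeyError.
def Pre_products_for_niche (niche : String) (count : Int) : Prop :=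
  niche ∈ (["manicure", "barber", "autoservice", "evacuator", "food"] : List String)
instance (niche : String) (count : Int) : Decidable (Pre_products_for_niche niche count) := by
  unfold Pre_products_for_niche; infer_instance
def pvWitness_products_for_niche : String × Int := ("manicure", 5)

def Spec_products_for_niche (niche : String) (count : Int) (out : List (List (String × String))) : Prop := out = products_for_niche_alt niche count
instance (niche : String) (count : Int) (out : List (List (String × String))) : Decidable (Spec_products_for_niche niche count out) := by unfold Spec_products_for_niche; infer_instance

-- ===== CLAIM (what is proved, stated in full; the proofs are below) =====
def Claim_equal_products_for_niche : Prop := ∀ (niche : String) (count : Int), Dom_products_for_niche niche count → Pre_products_for_niche niche count → Spec_products_for_niche niche count (products_for_niche niche count)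

-- ===== LEMMAS AND PROOFS =====

-- the row of global index k (0-based), for a fixed base
def pvItem (base : List (String × Int × String × String)) (k : Nat) : List (String × String) :=
  match base[k % base.length]? with
  | none => []
  | some (name, price, desc, query) =>
    [("name", name ++ " #" ++ PySem.Int.toStr ((k : Int) + 1)),
     ("price", PySem.Int.toStr (price + ((k / base.length : Nat) : Int) * 50)),
     ("description", desc),
     ("image", "https://source.unsplash.com/1200x800/?" ++ query ++ "&sig=" ++ PySem.Int.toStr ((k : Int) + 1))]

-- A's loop builds exactly the rows pvItem 0 .. count-1
lemma aLoop_eq (base : List (String × Int × String × String)) (hL : 0 < base.length) (count : Int) :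
    ((PySem.List.pyRange 0 count 1).foldl (fun result i =>
      match PySem.List.pyGet? base (PySem.Int.mod i (base.length : Int)) with
      | none => result
      | some (name, price, desc, query) =>
        result ++ [[("name", name ++ " #" ++ PySem.Int.toStr (i + 1)),
                    ("price", PySem.Int.toStr (price + PySem.Int.floordiv i (base.length : Int) * 50)),
                    ("description", desc),
                    ("image", "https://source.unsplash.com/1200x800/?" ++ query ++ "&sig=" ++ PySem.Int.toStr (i + 1))]])
      []) = (List.range count.toNat).map (pvItem base) := by
  rw [PySem.List.pyRange_one, List.foldl_map]
  have h : ∀ (acc : List (List (String × String))) (k : Nat), k ∈ List.range (count - 0).toNat →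
      (match PySem.List.pyGet? base (PySem.Int.mod ((0:Int) + ↑k) ↑base.length) with
       | none => acc
       | some (name, price, desc, query) =>
         acc ++ [[("name", name ++ " #" ++ PySem.Int.toStr ((0:Int) + ↑k + 1)),
                  ("price", PySem.Int.toStr (price + PySem.Int.floordiv ((0:Int) + ↑k) ↑base.length * 50)),
                  ("description", desc),
                  ("image", "https://source.unsplash.com/1200x800/?" ++ query ++ "&sig=" ++ PySem.Int.toStr ((0:Int) + ↑k + 1))]])
      = acc ++ [pvItem base k] := by
    intro acc k _
    simp only [zero_add]
    rw [PySem.Int.mod_natCast, PySem.List.pyGet?_natCast,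
        List.getElem?_eq_getElem (Nat.mod_lt k hL), PySem.Int.floordiv_natCast]
    unfold pvItem
    rw [List.getElem?_eq_getElem (Nat.mod_lt k hL)]
  have h2 := PySem.List.foldl_congr_mem _ _ _ ([] : List (List (String × String))) h
  rw [h2, PySem.List.foldl_append_singleton_eq_map]
  simp

-- inner loop closed form
lemma inner_spec (count r : Int) (ds : List (String × Int × String × String)) :
    ∀ (i : Int) acc, 0 ≤ i → i ≤ count →
    pvAltInner count r ds i acc =
      (i + (min ds.length (count - i).toNat : Nat),
       acc ++ (List.range (min ds.length (count - i).toNat)).map (fun j =>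
         match ds[j]? with
         | none => []
         | some (name, price, desc, query) =>
           [("name", name ++ " #" ++ PySem.Int.toStr (i + j + 1)),
            ("price", PySem.Int.toStr (price + r * 50)),
            ("description", desc),
            ("image", "https://source.unsplash.com/1200x800/?" ++ query ++ "&sig=" ++ PySem.Int.toStr (i + j + 1))])) := by
  induction ds with
  | nil => intro i acc _ _; simp [pvAltInner]
  | cons e ds ih =>
    obtain ⟨name, price, desc, query⟩ := e
    intro i acc hi hic
    by_cases hci : count ≤ i
    · have h0 : (count - i).toNat = 0 := by omega
      simp [pvAltInner, hci, h0]
    · have hlt : i < count := lt_of_not_ge hci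
      have ht : min (ds.length + 1) (count - i).toNat
          = min ds.length (count - (i + 1)).toNat + 1 := by omega
      rw [show pvAltInner count r ((name, price, desc, query) :: ds) i acc
            = pvAltInner count r ds (i + 1)
              (acc ++ [[("name", name ++ " #" ++ PySem.Int.toStr (i + 1)),
                        ("price", PySem.Int.toStr (price + r * 50)),
                        ("description", desc),
                        ("image", "https://source.unsplash.com/1200x800/?" ++ query ++ "&sig=" ++ PySem.Int.toStr (i + 1))]])
          from by simp [pvAltInner, hci]]
      rw [ih (i + 1) _ (by omega) (by omega)]
      simp only [List.length_cons, ht, List.range_succ_eq_map, List.map_cons, List.map_map,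
        Prod.mk.injEq]
      constructor
      · push_cast; ring_nf
      · simp only [List.getElem?_cons_zero, List.append_assoc, List.singleton_append]
        congr 1
        congr 1
        · norm_num
        · apply List.map_congr_left
          intro j hj
          simp only [Function.comp_apply, Nat.succ_eq_add_one, List.getElem?_cons_succ]
          rcases ds[j]? with _ | ⟨n2, p2, d2, q2⟩
          · rfl
          · push_cast
            ring_nf

lemma outer_ge (base : List (String × Int × String × String)) (count : Int) :
    ∀ fuel (i r : Int) acc, count ≤ i → pvAltOuter base count fuel i r acc = acc := by
  intro fuel i r acc h
  cases fuel with
  | zero => rfl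
  | succ f => simp [pvAltOuter, not_lt.mpr h]

-- one produced row of round r at position j equals the flat-index row
lemma row_eq (base : List (String × Int × String × String)) (hL : 0 < base.length)
    (r : Int) (hr : 0 ≤ r) (j : Nat) (hj : j < base.length) :
    (match base[j]? with
     | none => []
     | some (name, price, desc, query) =>
       [("name", name ++ " #" ++ PySem.Int.toStr (r * base.length + j + 1)),
        ("price", PySem.Int.toStr (price + r * 50)),
        ("description", desc),
        ("image", "https://source.unsplash.com/1200x800/?" ++ query ++ "&sig=" ++ PySem.Int.toStr (r * base.length + j + 1))])
    = pvItem base ((r * base.length : Int).toNat + j) := by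
  obtain ⟨m, rfl⟩ := Int.eq_ofNat_of_zero_le hr
  have h1 : ((m : Int) * (base.length : Int)).toNat = m * base.length := by
    rw [← Nat.cast_mul, Int.toNat_natCast]
  have h2 : (m * base.length + j) % base.length = j := by
    simp [Nat.mod_eq_of_lt hj]
  have h3 : (m * base.length + j) / base.length = m := by
    rw [Nat.mul_comm m base.length, Nat.mul_add_div hL, Nat.div_eq_of_lt hj, Nat.add_zero]
  unfold pvItem
  rw [h1, h2, h3]
  rcases base[j]? with _ | ⟨n2, p2, d2, q2⟩
  · rfl
  · push_cast
    ring_nf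

lemma outer_spec (base : List (String × Int × String × String)) (count : Int)
    (hL : 0 < base.length) :
    ∀ fuel (r : Int) (i : Int) acc, 0 ≤ r → i = r * base.length → (count - i).toNat ≤ fuel →
    pvAltOuter base count fuel i r acc =
      acc ++ (List.range (count - i).toNat).map (fun j => pvItem base (i.toNat + j)) := by
  intro fuel
  induction fuel with
  | zero =>
    intro r i acc hr hiL hf
    have h0 : (count - i).toNat = 0 := by omega
    simp [pvAltOuter, h0]
  | succ f ihf =>
    intro r i acc hr hiL hf
    have hi0 : 0 ≤ i := by
      rw [hiL]; positivity
    by_cases h : i < count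
    · have hrec := inner_spec count r base i acc hi0 (le_of_lt h)
      simp only [pvAltOuter, if_pos h, hrec]
      subst hiL
      by_cases h2 : (base.length : Int) ≤ count - r * base.length
      · have htL : min base.length (count - r * base.length).toNat = base.length := by omega
        rw [htL]
        rw [ihf (r + 1) (r * base.length + base.length) _ (by omega) (by ring) (by omega)]
        rw [List.append_assoc]
        have hn : (count - r * base.length).toNat
            = base.length + (count - (r * base.length + base.length)).toNat := by omega
        rw [hn, List.range_add, List.map_append, List.map_map]
        congr 1
        congr 1
        · apply List.map_congr_left
          intro j hj
          rw [List.mem_range] at hj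
          exact row_eq base hL r hr j hj
        · apply List.map_congr_left
          intro j hj
          simp only [Function.comp_apply]
          congr 1
          omega
      · have htc : min base.length (count - r * base.length).toNat
            = (count - r * base.length).toNat := by omega
        rw [htc]
        rw [outer_ge base count f _ (r + 1) _ (by omega)]
        congr 1
        apply List.map_congr_left
        intro j hj
        rw [List.mem_range] at hj
        exact row_eq base hL r hr j (by omega)
    · have h0 : (count - i).toNat = 0 := by omega
      simp [pvAltOuter, h, h0]

-- the two ports agree whenever the niche is found and the base is nonempty
lemma ports_eq_of_get (niche : String) (count : Int) (base : List (String × Int × String × String))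
    (hg : pvCatalog.get? niche = some base) (hL : 0 < base.length) :
    products_for_niche niche count = products_for_niche_alt niche count := by
  unfold products_for_niche products_for_niche_alt
  rw [hg]
  dsimp only
  rw [aLoop_eq base hL count]
  rw [outer_spec base count hL count.toNat 0 0 [] le_rfl (by ring) (by omega)]
  simp

-- ===== VERDICT (by name: the statement is the Claim_ definition above) =====
theorem products_for_niche_spec : Claim_equal_products_for_niche := by
  intro niche count _ hpre
  unfold Spec_products_for_niche
  unfold Pre_products_for_niche at hpre
  simp only [List.mem_cons, List.not_mem_nil, or_false] at hpre
  rcases hpre with h | h | h | h | h <;> subst h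
  · exact (ports_eq_of_get "manicure" count _ rfl (by decide))
  · exact (ports_eq_of_get "barber" count _ rfl (by decide))
  · exact (ports_eq_of_get "autoservice" count _ rfl (by decide))
  · exact (ports_eq_of_get "evacuator" count _ rfl (by decide))
  · exact (ports_eq_of_get "food" count _ rfl (by decide))
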